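-- pv_equiv track=rewrite | github.com/nekoferrara16/juniper-firewall-parser- | address_host_expander.py | resolve_set
-- ===== SOURCE A (Python) =====
-- def resolve_set(set_name, set2members, cache=None):
--     if cache is None:
--         cache = {}
--     if set_name in cache:
--         return cache[set_name]
--     members = set()
--     for member in set2members.get(set_name, []):
--         if member in set2members:
--             members.update(resolve_set(member, set2members, cache))
--         else:
--             members.add(member)
--     cache[set_name] = members
--     return members
-- ===== SOURCE B (Python) =====
-- def resolve_set(set_name, set2members, cache=None):
--     # Iterative post-order DFS with an explicit stack instead of recursion.
--     # Mutates `cache` exactly as the recursive version does.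
--     if cache is None:
--         cache = {}
--     if set_name in cache:
--         return cache[set_name]
--     stack = [(set_name, list(set2members.get(set_name, [])), set())]
--     while True:
--         name, todo, acc = stack[-1]
--         if not todo:
--             stack.pop()
--             cache[name] = acc
--             if not stack:
--                 return acc
--             stack[-1][2].update(acc)
--         else:
--             member = todo.pop(0)
--             if member in set2members:
--                 if member in cache:
--                     acc.update(cache[member])
--                 else:
--                     stack.append((member, list(set2members[member]), set()))
--             else:
--                 acc.add(member)
-- ===== Notes on version B (the rewrite author's own statement) =====
-- stated objective: alternative
-- what changed: A's recursion is replaced by an iterative post-order DFS over an explicit stack of (name, pending-members, accumulated-set) frames: a frame's set is merged into its parent and written to the cache when the frame is popped, with the same cache-hit short-circuits.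
-- outside the precondition, e.g. on resolve_set('a', {'a': ['a']}, {'a': ['x']}): A returns {'x'}, B returns {'x'}
import Mathlib
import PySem

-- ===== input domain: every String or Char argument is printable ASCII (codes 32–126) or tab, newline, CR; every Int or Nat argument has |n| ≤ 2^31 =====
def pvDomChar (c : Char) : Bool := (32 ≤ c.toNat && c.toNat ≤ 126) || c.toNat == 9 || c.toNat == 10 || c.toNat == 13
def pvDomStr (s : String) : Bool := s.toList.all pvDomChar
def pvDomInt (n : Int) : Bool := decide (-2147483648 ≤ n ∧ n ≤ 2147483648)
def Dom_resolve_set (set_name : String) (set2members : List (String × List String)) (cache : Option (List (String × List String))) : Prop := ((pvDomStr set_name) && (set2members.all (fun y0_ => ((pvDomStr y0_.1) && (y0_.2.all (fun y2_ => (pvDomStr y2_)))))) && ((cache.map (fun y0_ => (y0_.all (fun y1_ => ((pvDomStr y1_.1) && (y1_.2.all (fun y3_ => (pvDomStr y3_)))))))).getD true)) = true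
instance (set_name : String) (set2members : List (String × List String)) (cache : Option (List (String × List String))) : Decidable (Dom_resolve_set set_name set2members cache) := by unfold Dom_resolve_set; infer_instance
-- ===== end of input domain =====

-- B replaces A's recursion by an iterative post-order DFS with an explicit stack (objective: alternative;
-- both versions also mutate the Python `cache` argument identically — the theorems here are about the return value).

-- ===== PORT A =====
-- A's recursion, with a depth-fuel guard for totality (Python has no fuel; fuel only makes the
-- recursion well-founded — under Pre_ it is proved never to run out).
mutual
def goA (m : List (String × List String)) : Nat → String → PySem.Dict String (List String) → Option (List String × PySem.Dict String (List String))
  | 0, _, _ => none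
  | f+1, name, cache =>
    match PySem.Dict.get? cache name with
    | some v => some (v, cache)
    | none =>
      match loopA m f (PySem.Dict.getD (PySem.Dict.mk m) name []) PySem.Set.empty cache with
      | none => none
      | some (mem, c) => some (mem, PySem.Dict.insert c name mem)
  termination_by f _ _ => (f, 0)

def loopA (m : List (String × List String)) : Nat → List String → PySem.Set String → PySem.Dict String (List String) → Option (PySem.Set String × PySem.Dict String (List String))
  | _, [], acc, cache => some (acc, cache)
  | f, x :: t, acc, cache =>
    if (PySem.Dict.get? (PySem.Dict.mk m) x).isSome then
      match goA m f x cache with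
      | none => none
      | some (r, c) => loopA m f t (PySem.Set.update acc r) c
    else loopA m f t (PySem.Set.add acc x) cache
  termination_by f todo _ _ => (f, todo.length + 1)
end

def resolve_set (set_name : String) (set2members : List (String × List String)) (cache : Option (List (String × List String))) : List String :=
  let c0 := PySem.Dict.mk (cache.getD [])
  match goA set2members (set2members.length + 1) set_name c0 with
  | some (r, _) => r
  | none => []

-- ===== PORT B =====
-- helper: the largest member-list length (used only to size B's push-fuel guard)
def pvMaxLen : List (String × List String) → Nat
  | [] => 0
  | p :: r => max p.2.length (pvMaxLen r)

-- B's loop: explicit stack of (name, pending members, accumulated set) frames; fuel is consumed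
-- only when a new frame is pushed (the guard that makes the while-loop well-founded).
def goB (m : List (String × List String)) : Nat → List (String × List String × List String) → PySem.Dict String (List String) → List String
  | _, [], _ => []
  | fuel, (name, todo, acc) :: rest, cache =>
    match todo with
    | [] =>
      match rest with
      | [] => acc
      | (pn, pt, pacc) :: rs => goB m fuel ((pn, pt, PySem.Set.update pacc acc) :: rs) (PySem.Dict.insert cache name acc)
    | x :: t =>
      if (PySem.Dict.get? (PySem.Dict.mk m) x).isSome then
        match PySem.Dict.get? cache x with
        | some v => goB m fuel ((name, t, PySem.Set.update acc v) :: rest) cache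
        | none =>
          match fuel with
          | 0 => []
          | f+1 => goB m f ((x, PySem.Dict.getD (PySem.Dict.mk m) x [], PySem.Set.empty) :: (name, t, acc) :: rest) cache
      else goB m fuel ((name, t, PySem.Set.add acc x) :: rest) cache
  termination_by fuel stack _ => (fuel, (stack.map (fun fr => fr.2.1.length)).sum, stack.length)

def resolve_set_alt (set_name : String) (set2members : List (String × List String)) (cache : Option (List (String × List String))) : List String :=
  let c0 := PySem.Dict.mk (cache.getD [])
  match PySem.Dict.get? c0 set_name with
  | some v => v
  | none =>
    goB set2members ((pvMaxLen set2members + 1) ^ (set2members.length + 1))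
      [(set_name, PySem.Dict.getD (PySem.Dict.mk set2members) set_name [], PySem.Set.empty)] c0

-- ===== PRECONDITION & SPEC =====
-- reachability over the "is a member of" graph, restricted to names that are keys of set2members
def pvIsKey (m : List (String × List String)) (x : String) : Bool :=
  (PySem.Dict.get? (PySem.Dict.mk m) x).isSome
def pvSuccs (m : List (String × List String)) (x : String) : List String :=
  (PySem.Dict.getD (PySem.Dict.mk m) x []).filter (pvIsKey m)
def pvStep (m : List (String × List String)) (S : Finset String) : Finset String :=
  S ∪ S.biUnion (fun x => (pvSuccs m x).toFinset)
def pvClosure (m : List (String × List String)) : Nat → Finset String → Finset String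
  | 0, S => S
  | n+1, S => pvStep m (pvClosure m n S)
def pvReach (m : List (String × List String)) (x : String) : Finset String :=
  pvClosure m m.length (pvSuccs m x).toFinset

-- Pre_ excludes cyclic nested-set definitions reachable from set_name, on which Python A exceeds the
-- recursion limit (RecursionError); it is slightly stronger than A's exact termination condition: it does
-- not model cycles that are cut off by a name already present in the caller-supplied cache (both programs
-- still agree and return there).
def Pre_resolve_set (set_name : String) (set2members : List (String × List String)) (cache : Option (List (String × List String))) : Prop :=
  ∀ x ∈ insert set_name (pvReach set2members set_name), x ∉ pvReach set2members x
instance (set_name : String) (set2members : List (String × List String)) (cache : Option (List (String × List String))) : Decidable (Pre_resolve_set set_name set2members cache) := by unfold Pre_resolve_set; infer_instance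

def pvWitness_resolve_set : String × (List (String × List String)) × (Option (List (String × List String))) :=
  ("s", [("s", ["x", "t"]), ("t", ["y"])], none)

def Spec_resolve_set (set_name : String) (set2members : List (String × List String)) (cache : Option (List (String × List String))) (out : List String) : Prop := out = resolve_set_alt set_name set2members cache
instance (set_name : String) (set2members : List (String × List String)) (cache : Option (List (String × List String))) (out : List String) : Decidable (Spec_resolve_set set_name set2members cache out) := by unfold Spec_resolve_set; infer_instance

-- ===== CLAIM (what is proved, stated in full; the proofs are below) =====
def Claim_equal_resolve_set : Prop := ∀ (set_name : String) (set2members : List (String × List String)) (cache : Option (List (String × List String))), Dom_resolve_set set_name set2members cache → Pre_resolve_set set_name set2members cache → Spec_resolve_set set_name set2members cache (resolve_set set_name set2members cache)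

-- ===== LEMMAS AND PROOFS =====

theorem subset_pvStep (m : List (String × List String)) (S : Finset String) : S ⊆ pvStep m S :=
  Finset.subset_union_left

theorem pvStep_mono (m : List (String × List String)) {S T : Finset String} (h : S ⊆ T) :
    pvStep m S ⊆ pvStep m T :=
  Finset.union_subset_union h (Finset.biUnion_subset_biUnion_of_subset_left _ h)

theorem pvClosure_mono (m : List (String × List String)) (n : Nat) {S T : Finset String} (h : S ⊆ T) :
    pvClosure m n S ⊆ pvClosure m n T := by
  induction n with
  | zero => exact h
  | succ n ih => exact pvStep_mono m ih

theorem subset_pvClosure (m : List (String × List String)) (n : Nat) (S : Finset String) :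
    S ⊆ pvClosure m n S := by
  induction n with
  | zero => exact Finset.Subset.refl _
  | succ n ih => exact ih.trans (subset_pvStep m _)

theorem pvClosure_step_comm (m : List (String × List String)) (n : Nat) (S : Finset String) :
    pvClosure m n (pvStep m S) = pvStep m (pvClosure m n S) := by
  induction n with
  | zero => rfl
  | succ n ih => show pvStep m _ = _; rw [ih]; rfl

theorem mem_pvStep_of_succ (m : List (String × List String)) {S : Finset String} {x y : String}
    (hx : x ∈ S) (hy : y ∈ pvSuccs m x) : y ∈ pvStep m S := by
  exact Finset.mem_union.2 (Or.inr (Finset.mem_biUnion.2 ⟨x, hx, List.mem_toFinset.2 hy⟩))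

def pvKeysF (m : List (String × List String)) : Finset String := (m.map Prod.fst).toFinset

theorem isKey_mem_keys (m : List (String × List String)) {y : String}
    (h : pvIsKey m y = true) : y ∈ pvKeysF m := by
  induction m with
  | nil => simp [pvIsKey, PySem.Dict.get?] at h
  | cons p r ih =>
    unfold pvIsKey at h ih
    rw [show PySem.Dict.mk (p :: r) = PySem.Dict.mk ((p.1, p.2) :: r) by rfl,
      PySem.Dict.get?_mk_cons] at h
    by_cases hpy : (p.1 == y) = true
    · have hpe : p.1 = y := eq_of_beq hpy
      simp [pvKeysF, ← hpe]
    · rw [if_neg hpy] at h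
      have := ih h
      simp [pvKeysF] at this ⊢
      exact Or.inr this

theorem pvSuccs_subset_keys (m : List (String × List String)) (x : String) :
    (pvSuccs m x).toFinset ⊆ pvKeysF m := by
  intro y hy
  rw [List.mem_toFinset, pvSuccs, List.mem_filter] at hy
  exact isKey_mem_keys m hy.2

theorem pvClosure_subset_keys (m : List (String × List String)) (n : Nat) {S : Finset String}
    (h : S ⊆ pvKeysF m) : pvClosure m n S ⊆ pvKeysF m := by
  induction n with
  | zero => exact h
  | succ n ih =>
    show pvStep m _ ⊆ _
    refine Finset.union_subset ih (Finset.biUnion_subset.2 fun x _ => pvSuccs_subset_keys m x)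

theorem pvReach_subset_keys (m : List (String × List String)) (x : String) :
    pvReach m x ⊆ pvKeysF m :=
  pvClosure_subset_keys m _ (pvSuccs_subset_keys m x)

theorem card_keysF_le (m : List (String × List String)) : (pvKeysF m).card ≤ m.length := by
  calc (pvKeysF m).card ≤ (m.map Prod.fst).length := List.toFinset_card_le _
  _ = m.length := List.length_map ..

theorem pvClosure_chain (m : List (String × List String)) (n : Nat) (S : Finset String) :
    pvClosure m n S ⊆ pvClosure m (n+1) S := by
  show _ ⊆ pvStep m _
  exact subset_pvStep m _

theorem pvClosure_stable_add (m : List (String × List String)) (i : Nat) (S : Finset String)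
    (h : pvClosure m (i+1) S = pvClosure m i S) :
    ∀ j, pvClosure m (i + j) S = pvClosure m i S := by
  intro j
  induction j with
  | zero => rfl
  | succ j ih =>
    show pvStep m (pvClosure m (i + j) S) = _
    rw [ih]
    exact h

theorem pvClosure_growth (m : List (String × List String)) (S : Finset String) :
    ∀ n, (∀ i < n, pvClosure m (i+1) S ≠ pvClosure m i S) → n ≤ (pvClosure m n S).card := by
  intro n
  induction n with
  | zero => intro _; exact Nat.zero_le _
  | succ n ih =>
    intro h
    have h1 : n ≤ (pvClosure m n S).card := ih fun i hi => h i (Nat.lt_succ_of_lt hi)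
    have hss : pvClosure m n S ⊂ pvClosure m (n+1) S :=
      ⟨pvClosure_chain m n S, fun hsub => (h n (Nat.lt_succ_self n))
        (Finset.Subset.antisymm hsub (pvClosure_chain m n S))⟩
    have := Finset.card_lt_card hss
    omega

theorem pvClosure_saturated (m : List (String × List String)) {S : Finset String}
    (hS : S ⊆ pvKeysF m) : pvClosure m (m.length + 1) S = pvClosure m m.length S := by
  by_contra hne
  have hall : ∀ i < m.length + 1, pvClosure m (i+1) S ≠ pvClosure m i S := by
    intro i hi heq
    apply hne
    have h1 := pvClosure_stable_add m i S heq (m.length - i)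
    have h2 := pvClosure_stable_add m i S heq (m.length + 1 - i)
    rw [show i + (m.length - i) = m.length by omega] at h1
    rw [show i + (m.length + 1 - i) = m.length + 1 by omega] at h2
    rw [h1, h2]
  have := pvClosure_growth m S (m.length + 1) hall
  have hle : (pvClosure m (m.length + 1) S).card ≤ (pvKeysF m).card :=
    Finset.card_le_card (pvClosure_subset_keys m _ hS)
  have := card_keysF_le m
  omega

theorem mem_pvReach_of_succ (m : List (String × List String)) {x y : String}
    (h : y ∈ pvSuccs m x) : y ∈ pvReach m x :=
  subset_pvClosure m m.length _ (List.mem_toFinset.2 h)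

theorem pvReach_closed (m : List (String × List String)) {s x y : String}
    (hx : x ∈ pvReach m s) (hy : y ∈ pvSuccs m x) : y ∈ pvReach m s := by
  have h1 : y ∈ pvStep m (pvReach m s) := mem_pvStep_of_succ m hx hy
  have h2 : pvStep m (pvReach m s) = pvClosure m (m.length + 1) (pvSuccs m s).toFinset := rfl
  rw [h2, pvClosure_saturated m (pvSuccs_subset_keys m s)] at h1
  exact h1

theorem pvReach_subset_of_succ (m : List (String × List String)) {x y : String}
    (h : y ∈ pvSuccs m x) : pvReach m y ⊆ pvReach m x := by
  have h0 : (pvSuccs m y).toFinset ⊆ pvStep m (pvSuccs m x).toFinset := by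
    intro z hz
    exact mem_pvStep_of_succ m (List.mem_toFinset.2 h) (List.mem_toFinset.1 hz)
  calc pvReach m y ⊆ pvClosure m m.length (pvStep m (pvSuccs m x).toFinset) :=
        pvClosure_mono m _ h0
  _ = pvClosure m (m.length + 1) (pvSuccs m x).toFinset := by
        rw [pvClosure_step_comm]; rfl
  _ = pvReach m x := pvClosure_saturated m (pvSuccs_subset_keys m x)

theorem pvReach_card_lt (m : List (String × List String)) {x y : String}
    (h : y ∈ pvSuccs m x) (hy : y ∉ pvReach m y) :
    (pvReach m y).card < (pvReach m x).card := by
  refine Finset.card_lt_card ⟨pvReach_subset_of_succ m h, fun hsub => hy ?_⟩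
  exact hsub (mem_pvReach_of_succ m h)

theorem child_in_reach (m : List (String × List String)) {s name y : String}
    (hR : name = s ∨ name ∈ pvReach m s) (hy : y ∈ pvSuccs m name) : y ∈ pvReach m s := by
  cases hR with
  | inl h => exact h ▸ mem_pvReach_of_succ m hy
  | inr h => exact pvReach_closed m h hy

-- fuel sufficiency for A's recursion under Pre_
mutual
theorem goA_some (m : List (String × List String)) (s : String)
    (hPre : ∀ x ∈ insert s (pvReach m s), x ∉ pvReach m x) :
    ∀ (f : Nat) (name : String) (cache : PySem.Dict String (List String)),
      (name = s ∨ name ∈ pvReach m s) → (pvReach m name).card < f → (goA m f name cache).isSome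
  | 0, name, _cache, _, hf => absurd hf (by omega)
  | f+1, name, cache, hR, hf => by
    rw [goA]
    cases hc : PySem.Dict.get? cache name with
    | some v => simp
    | none =>
      have hl : (loopA m f (PySem.Dict.getD (PySem.Dict.mk m) name []) PySem.Set.empty cache).isSome := by
        apply loopA_some m s hPre f _ _ _
        intro x hx hkx
        have hxs : x ∈ pvSuccs m name := List.mem_filter.2 ⟨hx, hkx⟩
        have hxR : x ∈ pvReach m s := child_in_reach m hR hxs
        have hxy : x ∉ pvReach m x := hPre x (Finset.mem_insert_of_mem hxR)
        have := pvReach_card_lt m hxs hxy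
        exact ⟨hxR, by omega⟩
      obtain ⟨⟨r, c⟩, hrc⟩ := Option.isSome_iff_exists.1 hl
      rw [hrc]
      simp
  termination_by f _ _ _ _ => (f, 0)

theorem loopA_some (m : List (String × List String)) (s : String)
    (hPre : ∀ x ∈ insert s (pvReach m s), x ∉ pvReach m x) :
    ∀ (f : Nat) (todo : List String) (acc : PySem.Set String) (cache : PySem.Dict String (List String)),
      (∀ x ∈ todo, pvIsKey m x = true → x ∈ pvReach m s ∧ (pvReach m x).card < f) →
      (loopA m f todo acc cache).isSome
  | f, [], acc, cache, _ => by rw [loopA]; simp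
  | f, x :: t, acc, cache, h => by
    rw [loopA]
    by_cases hk : (PySem.Dict.get? (PySem.Dict.mk m) x).isSome
    · rw [if_pos hk]
      obtain ⟨hxR, hxf⟩ := h x (List.mem_cons_self ..) hk
      have hg := goA_some m s hPre f x cache (Or.inr hxR) hxf
      obtain ⟨⟨r, c⟩, hrc⟩ := Option.isSome_iff_exists.1 hg
      rw [hrc]
      exact loopA_some m s hPre f t _ c fun y hy => h y (List.mem_cons_of_mem _ hy)
    · rw [if_neg hk]
      exact loopA_some m s hPre f t _ cache fun y hy => h y (List.mem_cons_of_mem _ hy)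
  termination_by f todo _ _ _ => (f, todo.length + 1)
end

theorem getD_len_le (m : List (String × List String)) (x : String) :
    (PySem.Dict.getD (PySem.Dict.mk m) x []).length ≤ pvMaxLen m := by
  induction m with
  | nil => simp [PySem.Dict.getD, PySem.Dict.get?, pvMaxLen]
  | cons p r ih =>
    rw [pvMaxLen]
    rw [show PySem.Dict.mk (p :: r) = PySem.Dict.mk ((p.1, p.2) :: r) by rfl] at *
    rw [PySem.Dict.getD, PySem.Dict.get?_mk_cons]
    by_cases hpx : (p.1 == x) = true
    · rw [if_pos hpx]; simp
    · rw [if_neg hpx]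
      rw [PySem.Dict.getD] at ih
      omega

theorem one_le_pow_maxlen (m : List (String × List String)) (f : Nat) :
    1 ≤ (pvMaxLen m + 1) ^ f := Nat.one_le_pow _ _ (by omega)


-- single steps of the stack machine
theorem goB_ret (m : List (String × List String)) (fuel : Nat) (name : String) (acc : List String)
    (cache : PySem.Dict String (List String)) :
    goB m fuel [(name, [], acc)] cache = acc := by
  rw [goB.eq_def]

theorem goB_pop (m : List (String × List String)) (fuel : Nat) (name : String) (acc : List String)
    (pn : String) (pt : List String) (pacc : List String)
    (rs : List (String × List String × List String)) (cache : PySem.Dict String (List String)) :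
    goB m fuel ((name, [], acc) :: (pn, pt, pacc) :: rs) cache
      = goB m fuel ((pn, pt, PySem.Set.update pacc acc) :: rs) (PySem.Dict.insert cache name acc) := by
  rw [goB.eq_def]

theorem goB_hit (m : List (String × List String)) (fuel : Nat) (name x : String)
    (t : List String) (acc : List String) (rest : List (String × List String × List String))
    (cache : PySem.Dict String (List String)) (v : List String)
    (hk : (PySem.Dict.get? (PySem.Dict.mk m) x).isSome = true)
    (hc : PySem.Dict.get? cache x = some v) :
    goB m fuel ((name, x :: t, acc) :: rest) cache
      = goB m fuel ((name, t, PySem.Set.update acc v) :: rest) cache := by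
  rw [goB.eq_def]
  simp [hk, hc]

theorem goB_push (m : List (String × List String)) (f : Nat) (name x : String)
    (t : List String) (acc : List String) (rest : List (String × List String × List String))
    (cache : PySem.Dict String (List String))
    (hk : (PySem.Dict.get? (PySem.Dict.mk m) x).isSome = true)
    (hc : PySem.Dict.get? cache x = none) :
    goB m (f + 1) ((name, x :: t, acc) :: rest) cache
      = goB m f ((x, PySem.Dict.getD (PySem.Dict.mk m) x [], PySem.Set.empty) :: (name, t, acc) :: rest) cache := by
  rw [goB.eq_def]
  simp [hk, hc]

theorem goB_leaf (m : List (String × List String)) (fuel : Nat) (name x : String)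
    (t : List String) (acc : List String) (rest : List (String × List String × List String))
    (cache : PySem.Dict String (List String))
    (hk : (PySem.Dict.get? (PySem.Dict.mk m) x).isSome = false) :
    goB m fuel ((name, x :: t, acc) :: rest) cache
      = goB m fuel ((name, t, PySem.Set.add acc x) :: rest) cache := by
  rw [goB.eq_def]
  simp [hk]

-- simulation: the stack machine goB replays A's recursion step for step
mutual
theorem simGo (m : List (String × List String)) :
    ∀ (f : Nat) (x : String) (cache : PySem.Dict String (List String)) (r : List String)
      (c : PySem.Dict String (List String)),
      (PySem.Dict.get? (PySem.Dict.mk m) x).isSome = true →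
      goA m f x cache = some (r, c) →
      ∃ k ≤ (pvMaxLen m + 1) ^ f, ∀ (fB : Nat) (name : String) (t : List String)
        (acc : List String) (rest : List (String × List String × List String)),
        goB m (fB + k) ((name, x :: t, acc) :: rest) cache
          = goB m fB ((name, t, PySem.Set.update acc r) :: rest) c
  | 0, x, cache, r, c, _, h => by rw [goA] at h; exact absurd h (by simp)
  | f+1, x, cache, r, c, hkey, h => by
    rw [goA] at h
    cases hc : PySem.Dict.get? cache x with
    | some v =>
      rw [hc] at h
      obtain ⟨hr, hcc⟩ := Prod.mk.inj (Option.some.inj h)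
      subst hr; subst hcc
      refine ⟨0, Nat.zero_le _, fun fB name t acc rest => ?_⟩
      rw [Nat.add_zero, goB_hit m fB name x t acc rest cache v hkey hc]
    | none =>
      rw [hc] at h
      cases hl : loopA m f (PySem.Dict.getD (PySem.Dict.mk m) x []) PySem.Set.empty cache with
      | none => rw [hl] at h; exact absurd h (by simp)
      | some p =>
        obtain ⟨r0, c0⟩ := p
        rw [hl] at h
        obtain ⟨hr, hcc⟩ := Prod.mk.inj (Option.some.inj h)
        obtain ⟨k', hk', H'⟩ := simLoop m f _ PySem.Set.empty cache r0 c0 hl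
        refine ⟨k' + 1, ?_, fun fB name t acc rest => ?_⟩
        · have h1 : (PySem.Dict.getD (PySem.Dict.mk m) x []).length ≤ pvMaxLen m := getD_len_le m x
          have h2 : (pvMaxLen m + 1) ^ (f+1) = (pvMaxLen m + 1) ^ f * (pvMaxLen m + 1) := by ring
          have h3 := one_le_pow_maxlen m f
          have h4 : k' ≤ (PySem.Dict.getD (PySem.Dict.mk m) x []).length * (pvMaxLen m + 1) ^ f := hk'
          have h5 : (PySem.Dict.getD (PySem.Dict.mk m) x []).length * (pvMaxLen m + 1) ^ f
              ≤ pvMaxLen m * (pvMaxLen m + 1) ^ f := Nat.mul_le_mul_right _ h1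
          calc k' + 1 ≤ pvMaxLen m * (pvMaxLen m + 1) ^ f + 1 := by omega
          _ ≤ (pvMaxLen m + 1) ^ (f+1) := by rw [h2]; nlinarith
        · rw [show fB + (k' + 1) = (fB + k') + 1 by omega,
            goB_push m (fB + k') name x t acc rest cache hkey hc,
            H' fB x ((name, t, acc) :: rest), goB_pop, ← hr, ← hcc]
  termination_by f _ _ _ _ _ _ => (f, 0)

theorem simLoop (m : List (String × List String)) :
    ∀ (f : Nat) (todo : List String) (acc : List String)
      (cache : PySem.Dict String (List String)) (a : List String)
      (c : PySem.Dict String (List String)),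
      loopA m f todo acc cache = some (a, c) →
      ∃ k ≤ todo.length * (pvMaxLen m + 1) ^ f, ∀ (fB : Nat) (name : String)
        (rest : List (String × List String × List String)),
        goB m (fB + k) ((name, todo, acc) :: rest) cache
          = goB m fB ((name, ([] : List String), a) :: rest) c
  | f, [], acc, cache, a, c, h => by
    rw [loopA] at h
    obtain ⟨ha, hcc⟩ := Prod.mk.inj (Option.some.inj h)
    exact ⟨0, Nat.zero_le _, fun fB name rest => by rw [Nat.add_zero, ha, hcc]⟩
  | f, x :: t, acc, cache, a, c, h => by
    rw [loopA] at h
    by_cases hk : (PySem.Dict.get? (PySem.Dict.mk m) x).isSome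
    · rw [if_pos hk] at h
      cases hg : goA m f x cache with
      | none => rw [hg] at h; exact absurd h (by simp)
      | some p =>
        obtain ⟨r, c1⟩ := p
        rw [hg] at h
        obtain ⟨k1, hb1, H1⟩ := simGo m f x cache r c1 hk hg
        obtain ⟨k2, hb2, H2⟩ := simLoop m f t (PySem.Set.update acc r) c1 a c h
        refine ⟨k1 + k2, ?_, fun fB name rest => ?_⟩
        · have := one_le_pow_maxlen m f
          calc k1 + k2 ≤ (pvMaxLen m + 1) ^ f + t.length * (pvMaxLen m + 1) ^ f := by omega
          _ = (t.length + 1) * (pvMaxLen m + 1) ^ f := by ring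
          _ = (x :: t).length * (pvMaxLen m + 1) ^ f := by simp
        · rw [show fB + (k1 + k2) = (fB + k2) + k1 by omega]
          rw [H1 (fB + k2) name t acc rest]
          exact H2 fB name rest
    · rw [if_neg hk] at h
      obtain ⟨k2, hb2, H2⟩ := simLoop m f t (PySem.Set.add acc x) cache a c h
      refine ⟨k2, ?_, fun fB name rest => ?_⟩
      · have h5 : t.length * (pvMaxLen m + 1) ^ f ≤ (t.length + 1) * (pvMaxLen m + 1) ^ f :=
          Nat.mul_le_mul_right _ (Nat.le_succ _)
        have h6 : ((x :: t).length : Nat) = t.length + 1 := rfl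
        rw [h6]
        omega
      · rw [goB_leaf m (fB + k2) name x t acc rest cache (by simpa using hk)]
        exact H2 fB name rest
  termination_by f todo _ _ _ _ _ => (f, todo.length + 1)
end

-- ===== VERDICT (by name: the statement is the Claim_ definition above) =====
theorem resolve_set_spec : Claim_equal_resolve_set := by
  intro sn m cache _ hPre
  unfold Spec_resolve_set
  simp only [resolve_set, resolve_set_alt]
  set c0 := PySem.Dict.mk (cache.getD []) with hc0
  have hcard : (pvReach m sn).card < m.length + 1 := by
    have h1 : (pvReach m sn).card ≤ (pvKeysF m).card :=
      Finset.card_le_card (pvReach_subset_keys m sn)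
    have := card_keysF_le m
    omega
  have hA : (goA m (m.length + 1) sn c0).isSome :=
    goA_some m sn hPre (m.length + 1) sn c0 (Or.inl rfl) hcard
  rw [goA] at hA ⊢
  cases hc : PySem.Dict.get? c0 sn with
  | some v => rfl
  | none =>
    rw [hc] at hA
    cases hl : loopA m m.length (PySem.Dict.getD (PySem.Dict.mk m) sn []) PySem.Set.empty c0 with
    | none => rw [hl] at hA; simp at hA
    | some p =>
      obtain ⟨r0, c0'⟩ := p
      rw [hl] at hA
      show r0 = goB m ((pvMaxLen m + 1) ^ (m.length + 1))
        [(sn, PySem.Dict.getD (PySem.Dict.mk m) sn [], PySem.Set.empty)] c0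
      obtain ⟨k, hk, H⟩ := simLoop m m.length _ PySem.Set.empty c0 r0 c0' hl
      have hkle : k ≤ (pvMaxLen m + 1) ^ (m.length + 1) := by
        have h1 : (PySem.Dict.getD (PySem.Dict.mk m) sn []).length ≤ pvMaxLen m := getD_len_le m sn
        have h2 : (PySem.Dict.getD (PySem.Dict.mk m) sn []).length * (pvMaxLen m + 1) ^ m.length
            ≤ pvMaxLen m * (pvMaxLen m + 1) ^ m.length := Nat.mul_le_mul_right _ h1
        have h3 : (pvMaxLen m + 1) ^ (m.length + 1) = (pvMaxLen m + 1) ^ m.length * (pvMaxLen m + 1) := by ring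
        have h4 := one_le_pow_maxlen m m.length
        calc k ≤ pvMaxLen m * (pvMaxLen m + 1) ^ m.length := le_trans hk h2
        _ ≤ (pvMaxLen m + 1) ^ (m.length + 1) := by rw [h3]; nlinarith
      have hfin := H ((pvMaxLen m + 1) ^ (m.length + 1) - k) sn []
      rw [Nat.sub_add_cancel hkle] at hfin
      rw [hfin, goB_ret]
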